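-- pv_equiv track=rewrite | github.com/jtwool/battleship | battleship.py | find_horizontal_valid_spots
-- ===== SOURCE A (Python) =====
-- def spot_is_empty(xs):
--     """Check if a spot is empty"""
--     return all(map(lambda x:x==0, xs))
--
-- def spot_is_long_enough(xs, boat):
--     """Check if a spot is long enough to fit a boat"""
--     return len(xs)==boat
--
-- def find_horizontal_valid_spots(boat, board):
--     """Find valid horizontal spots for a boat of size boat"""
--     valid_spots = []
--     for i,row in enumerate(board):
--         for j,x in enumerate(row):
--            spot = row[j:j+boat]
--            if (spot_is_empty(spot) and spot_is_long_enough(spot, boat)):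
--                valid_spots.append([(i,x) for x in range(j,j+boat)])
--     return valid_spots
-- ===== SOURCE B (Python) =====
-- def find_horizontal_valid_spots(boat, board):
--     """Find valid horizontal spots for a boat of size boat (running count of consecutive zeros)"""
--     valid_spots = []
--     for i, row in enumerate(board):
--         run = 0
--         for j, x in enumerate(row):
--             run = run + 1 if x == 0 else 0
--             if run >= boat:
--                 valid_spots.append([(i, c) for c in range(j + 1 - boat, j + 1)])
--     return valid_spots
-- ===== Notes on version B (the rewrite author's own statement) =====
-- stated objective: faster
-- what changed: A re-slices the row and rescans the whole slice at every cell (O(rows*cols*boat)); B makes one pass per row keeping a running count of consecutive zeros and emits a spot whenever the count reaches the boat length (O(rows*cols)). Pre_ restricts to nonnegative boat: a negative boat size is outside the task's natural domain (A accidentally returns [] there, B's natural run-length test emits an empty window per cell).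
-- outside the precondition, e.g. on find_horizontal_valid_spots(-1, [[0]]): A returns [], B returns [[]]
import Mathlib
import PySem

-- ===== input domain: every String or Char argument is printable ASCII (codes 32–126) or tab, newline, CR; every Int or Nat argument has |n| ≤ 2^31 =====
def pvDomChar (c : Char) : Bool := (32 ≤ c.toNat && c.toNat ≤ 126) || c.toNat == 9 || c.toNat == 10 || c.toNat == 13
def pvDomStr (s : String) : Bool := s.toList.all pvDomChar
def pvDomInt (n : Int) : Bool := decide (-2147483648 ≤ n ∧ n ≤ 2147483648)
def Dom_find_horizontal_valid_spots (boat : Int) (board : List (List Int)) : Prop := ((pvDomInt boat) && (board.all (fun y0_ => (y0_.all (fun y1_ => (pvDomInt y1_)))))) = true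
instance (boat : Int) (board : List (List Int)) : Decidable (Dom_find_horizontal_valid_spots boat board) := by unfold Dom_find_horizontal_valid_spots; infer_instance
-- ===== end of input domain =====

-- B replaces A's per-cell slice-and-scan test by a per-row running count of consecutive zeros,
-- emitting a spot each time the count reaches the boat length (objective: faster).

-- ===== PORT A =====
def spot_is_empty (xs : List Int) : Bool :=
  xs.all (fun x => x == 0)

def spot_is_long_enough (xs : List Int) (boat : Int) : Bool :=
  (xs.length : Int) == boat

def find_horizontal_valid_spots (boat : Int) (board : List (List Int)) : List (List (Int × Int)) :=
  (PySem.List.enumerate board).foldl (fun valid_spots ir =>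
    (PySem.List.enumerate ir.2).foldl (fun valid_spots jx =>
      let spot := PySem.List.slice ir.2 (some jx.1) (some (jx.1 + boat))
      if spot_is_empty spot && spot_is_long_enough spot boat then
        valid_spots ++ [(PySem.List.pyRange jx.1 (jx.1 + boat) 1).map (fun x => (ir.1, x))]
      else valid_spots) valid_spots) []

-- ===== PORT B =====
def find_horizontal_valid_spots_alt (boat : Int) (board : List (List Int)) : List (List (Int × Int)) :=
  (PySem.List.enumerate board).foldl (fun valid_spots ir =>
    ((PySem.List.enumerate ir.2).foldl (fun st jx =>
      let run : Int := if jx.2 == 0 then st.1 + 1 else 0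
      (run,
        if boat ≤ run then
          st.2 ++ [(PySem.List.pyRange (jx.1 + 1 - boat) (jx.1 + 1) 1).map (fun c => (ir.1, c))]
        else st.2)) ((0 : Int), valid_spots)).2) []

-- ===== PRECONDITION & SPEC =====
-- Pre_ restricts to nonnegative boat sizes, the task's natural domain: on a negative boat
-- A's len(spot)==boat test accidentally never fires (A returns []), while B's natural
-- run-length test trivially fires and emits empty windows.
def Pre_find_horizontal_valid_spots (boat : Int) (board : List (List Int)) : Prop := 0 ≤ boat
instance (boat : Int) (board : List (List Int)) : Decidable (Pre_find_horizontal_valid_spots boat board) := by unfold Pre_find_horizontal_valid_spots; infer_instance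
def pvWitness_find_horizontal_valid_spots : Int × List (List Int) := (2, [[0, 0, 1], [0, 1, 0]])
def Spec_find_horizontal_valid_spots (boat : Int) (board : List (List Int)) (out : List (List (Int × Int))) : Prop := out = find_horizontal_valid_spots_alt boat board
instance (boat : Int) (board : List (List Int)) (out : List (List (Int × Int))) : Decidable (Spec_find_horizontal_valid_spots boat board out) := by unfold Spec_find_horizontal_valid_spots; infer_instance

-- ===== CLAIM (what is proved, stated in full; the proofs are below) =====
def Claim_equal_find_horizontal_valid_spots : Prop := ∀ (boat : Int) (board : List (List Int)), Dom_find_horizontal_valid_spots boat board → Pre_find_horizontal_valid_spots boat board → Spec_find_horizontal_valid_spots boat board (find_horizontal_valid_spots boat board)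

-- ===== LEMMAS AND PROOFS =====

-- The window [(i,a), (i,a+1), …, (i,b-1)] appended for one valid spot.
def wndw (i a b : Int) : List (Int × Int) :=
  (PySem.List.pyRange a b 1).map (fun c => (i, c))

-- A's per-cell test at start index j of row `src`.
def condA (boat : Int) (src : List Int) (j : Int) : Bool :=
  spot_is_empty (PySem.List.slice src (some j) (some (j + boat))) &&
  spot_is_long_enough (PySem.List.slice src (some j) (some (j + boat))) boat

-- Emissions of A's inner loop on one row, as filter/map over the enumerated row.
def innerA (boat i : Int) (row : List Int) : List (List (Int × Int)) :=
  ((PySem.List.enumerate row).filter (fun jx => condA boat row jx.1)).map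
    (fun jx => wndw i jx.1 (jx.1 + boat))

-- The same emissions indexed by List.range (src and range length kept separate for the
-- snoc recurrence, where the row grows but the old indices stay).
def innerR (boat i : Int) (src : List Int) (n : Nat) : List (List (Int × Int)) :=
  ((List.range n).filter (fun (k : Nat) => condA boat src (k : Int))).map
    (fun (k : Nat) => wndw i (k : Int) ((k : Int) + boat))

-- B's inner-loop step and emissions.
def bstep (boat i : Int) (st : Int × List (List (Int × Int))) (jx : Int × Int) :
    Int × List (List (Int × Int)) :=
  let run : Int := if jx.2 == 0 then st.1 + 1 else 0
  (run, if boat ≤ run then st.2 ++ [wndw i (jx.1 + 1 - boat) (jx.1 + 1)] else st.2)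

def innerB (boat i : Int) (row : List Int) : List (List (Int × Int)) :=
  ((PySem.List.enumerate row).foldl (bstep boat i) (0, [])).2

-- Length of the maximal all-zero suffix of a row (B's `run` after the row).
def zrun (row : List Int) : Int :=
  row.foldl (fun r x => if x == 0 then r + 1 else 0) 0

theorem zrun_snoc (row : List Int) (x : Int) :
    zrun (row ++ [x]) = if x == 0 then zrun row + 1 else 0 := by
  simp [zrun, List.foldl_append]

theorem zrun_nonneg (row : List Int) : 0 ≤ zrun row := by
  induction row using List.reverseRecOn with
  | nil => simp [zrun]
  | append_singleton row x ih => rw [zrun_snoc]; split <;> omega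

theorem zrun_le_len (row : List Int) : zrun row ≤ (row.length : Int) := by
  induction row using List.reverseRecOn with
  | nil => simp [zrun]
  | append_singleton row x ih => rw [zrun_snoc]; simp; split <;> omega

theorem zrun_ge_iff (row : List Int) (b : Nat) :
    ((b : Int) ≤ zrun row) ↔ (b ≤ row.length ∧ (row.drop (row.length - b)).all (· == 0)) := by
  induction row using List.reverseRecOn generalizing b with
  | nil => cases b <;> simp [zrun]
  | append_singleton row x ih =>
    cases b with
    | zero =>
      constructor
      · intro _; exact ⟨Nat.zero_le _, by simp⟩
      · intro _; exact zrun_nonneg _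
    | succ b =>
      rw [zrun_snoc]
      have hlen : (row ++ [x]).length = row.length + 1 := by simp
      rw [hlen]
      by_cases hx : x = 0
      · subst hx
        simp only [BEq.rfl, if_true]
        constructor
        · intro h
          have hb : (b : Int) ≤ zrun row := by push_cast at h ⊢; omega
          obtain ⟨h1, h2⟩ := (ih b).mp hb
          refine ⟨by omega, ?_⟩
          have : row.length + 1 - (b + 1) = row.length - b := by omega
          rw [this, List.drop_append_of_le_length (by omega)]
          simp only [List.all_append, h2, Bool.true_and]
          simp
        · rintro ⟨h1, h2⟩
          have : row.length + 1 - (b + 1) = row.length - b := by omega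
          rw [this, List.drop_append_of_le_length (by omega)] at h2
          simp only [List.all_append] at h2
          have := (ih b).mpr ⟨by omega, ((Bool.and_eq_true _ _).mp h2).1⟩
          push_cast
          omega
      · rw [if_neg (by simpa using hx)]
        constructor
        · intro h; exfalso; push_cast at h; omega
        · rintro ⟨h1, h2⟩
          exfalso
          have : row.length + 1 - (b + 1) ≤ row.length := by omega
          rw [List.drop_append_of_le_length this] at h2
          simp only [List.all_append] at h2
          have := ((Bool.and_eq_true _ _).mp h2).2
          simp at this
          exact hx this

-- A port's inner fold is `acc ++ innerA`.
set_option maxHeartbeats 1000000 in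
theorem fold_innerA (boat i : Int) (row : List Int) (acc : List (List (Int × Int))) :
    (PySem.List.enumerate row).foldl (fun valid_spots jx =>
      let spot := PySem.List.slice row (some jx.1) (some (jx.1 + boat))
      if spot_is_empty spot && spot_is_long_enough spot boat then
        valid_spots ++ [(PySem.List.pyRange jx.1 (jx.1 + boat) 1).map (fun x => (i, x))]
      else valid_spots) acc = acc ++ innerA boat i row := by
  rw [innerA]
  change (PySem.List.enumerate row).foldl (fun valid_spots jx =>
      if condA boat row jx.1 then valid_spots ++ [wndw i jx.1 (jx.1 + boat)]
      else valid_spots) acc = _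
  exact PySem.List.foldl_append_if (fun jx => condA boat row jx.1)
    (fun jx => wndw i jx.1 (jx.1 + boat)) (PySem.List.enumerate row) acc

-- B port's inner fold: first component is the running zero-count, second is `acc ++ emissions`.
theorem fold_innerB_fst (boat i : Int) (row : List Int) (s run : Int)
    (acc : List (List (Int × Int))) :
    ((PySem.List.enumerate row s).foldl (bstep boat i) (run, acc)).1 =
      row.foldl (fun r x => if x == 0 then r + 1 else 0) run := by
  induction row generalizing s run acc with
  | nil => simp [PySem.List.enumerate_nil]
  | cons y t ih =>
    rw [PySem.List.enumerate_cons, List.foldl_cons, List.foldl_cons, bstep]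
    split <;> exact ih _ _ _

theorem fold_innerB_snd (boat i : Int) (row : List Int) (s run : Int)
    (acc : List (List (Int × Int))) :
    ((PySem.List.enumerate row s).foldl (bstep boat i) (run, acc)).2 =
      acc ++ ((PySem.List.enumerate row s).foldl (bstep boat i) (run, [])).2 := by
  induction row generalizing s run acc with
  | nil => simp [PySem.List.enumerate_nil]
  | cons y t ih =>
    rw [PySem.List.enumerate_cons, List.foldl_cons, List.foldl_cons]
    simp only [bstep, List.nil_append]
    split
    · split
      · rw [ih, ih (s + 1) _ [wndw i (s + 1 - boat) (s + 1)], List.append_assoc]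
      · exact ih _ _ _
    · split
      · rw [ih, ih (s + 1) _ [wndw i (s + 1 - boat) (s + 1)], List.append_assoc]
      · exact ih _ _ _

theorem innerB_snoc (boat i : Int) (row : List Int) (x : Int) :
    innerB boat i (row ++ [x]) = innerB boat i row ++
      (if boat ≤ zrun (row ++ [x]) then
        [wndw i ((row.length : Int) + 1 - boat) ((row.length : Int) + 1)] else []) := by
  rw [innerB, PySem.List.enumerate_append, List.foldl_append]
  have hS : (PySem.List.enumerate row 0).foldl (bstep boat i) (0, []) =
      (zrun row, innerB boat i row) := by
    rw [Prod.ext_iff]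
    exact ⟨fold_innerB_fst boat i row 0 0 [], rfl⟩
  rw [hS, PySem.List.enumerate_cons, PySem.List.enumerate_nil, List.foldl_cons, List.foldl_nil,
    bstep, zrun_snoc]
  simp only [zero_add]
  by_cases hx : (x == 0) = true
  · simp only [hx, if_true]
    split <;> simp
  · simp only [hx, if_false, Bool.false_eq_true]
    split <;> simp

theorem enumerate_map_fst (row : List Int) (s : Int) :
    (PySem.List.enumerate row s).map Prod.fst =
      (List.range row.length).map (fun (k : Nat) => s + (k : Int)) := by
  induction row generalizing s with
  | nil => simp [PySem.List.enumerate_nil]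
  | cons y t ih =>
    rw [PySem.List.enumerate_cons, List.map_cons, ih, List.length_cons,
      List.range_succ_eq_map, List.map_cons, List.map_map]
    refine List.cons_eq_cons.mpr ⟨by simp, ?_⟩
    apply List.map_congr_left
    intro k _
    simp only [Function.comp_apply]
    push_cast
    ring

theorem innerA_eq_innerR (boat i : Int) (row : List Int) :
    innerA boat i row = innerR boat i row row.length := by
  rw [innerA, innerR]
  have h1 : ((PySem.List.enumerate row).filter (fun jx => condA boat row jx.1)).map
      (fun jx => wndw i jx.1 (jx.1 + boat)) =
      (((PySem.List.enumerate row).map Prod.fst).filter (fun j => condA boat row j)).map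
      (fun j => wndw i j (j + boat)) := by
    rw [List.filter_map, List.map_map]
    rfl
  rw [h1, enumerate_map_fst, List.filter_map, List.map_map]
  simp only [zero_add]
  rfl

-- Splitting a filtered range when the two predicates differ at one index only.
theorem filter_range_split (n j : Nat) (p p' : Nat → Bool)
    (hlow : ∀ k, k < j → p' k = p k)
    (hhigh : ∀ k, j < k → k < n → p' k = false)
    (hp : ∀ k, j ≤ k → k < n → p k = false) :
    (List.range n).filter p' = (List.range n).filter p ++ (if j < n ∧ p' j then [j] else []) := by
  induction n with
  | zero => simp
  | succ n ih =>
    rw [List.range_succ, List.filter_append, List.filter_append,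
      ih (fun k h1 h2 => hhigh k h1 (by omega)) (fun k h1 h2 => hp k h1 (by omega))]
    rcases Nat.lt_trichotomy n j with h | h | h
    · have h1 : p' n = p n := hlow n h
      have h2 : ¬ j < n := by omega
      have h3 : ¬ j < n + 1 := by omega
      simp [h2, h3, List.filter, h1]
    · subst h
      have h2 : p n = false := hp n (le_refl _) (by omega)
      simp [h2, List.filter]
      cases p' n <;> simp
    · have h1 : p' n = false := hhigh n h (by omega)
      have h2 : p n = false := hp n (by omega) (by omega)
      have h3 : (j < n ∧ p' j = true) ↔ (j ≤ n ∧ p' j = true) := by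
        constructor
        · rintro ⟨a, b⟩; exact ⟨by omega, b⟩
        · rintro ⟨a, b⟩; exact ⟨by omega, b⟩
      simp [h1, h2]
      split_ifs with hc hd hd
      · simp
      · exact absurd (h3.mp hc) hd
      · exact absurd (h3.mpr hd) hc
      · simp

theorem condA_char (boat : Int) (hb : 0 ≤ boat) (src : List Int) (k : Nat) (hk : k ≤ src.length) :
    condA boat src (k : Int) =
      (decide (k + boat.toNat ≤ src.length) && ((src.drop k).take boat.toNat).all (· == 0)) := by
  have hsl : PySem.List.slice src (some (k : Int)) (some ((k : Int) + boat)) =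
      (src.drop k).take boat.toNat := by
    rw [PySem.List.slice_toNat src (by positivity) (by omega)]
    simp only [Int.toNat_natCast]
    have h2 : ((k : Int) + boat).toNat - k = boat.toNat := by omega
    rw [h2]
  rw [condA, hsl, spot_is_long_enough, spot_is_empty]
  have hlen : ((src.drop k).take boat.toNat).length = min boat.toNat (src.length - k) := by
    simp
  by_cases hfit : k + boat.toNat ≤ src.length
  · have h1 : (((src.drop k).take boat.toNat).length : Int) = boat := by
      rw [hlen]; push_cast; omega
    rw [beq_iff_eq.mpr h1, decide_eq_true hfit, Bool.and_true, Bool.true_and]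
  · have h1 : (((src.drop k).take boat.toNat).length : Int) ≠ boat := by
      rw [hlen]; push_cast; omega
    rw [beq_eq_false_iff_ne.mpr h1, Bool.and_false, decide_eq_false hfit, Bool.false_and]

theorem condA_hi_false (boat : Int) (hb : 0 ≤ boat) (src : List Int) (k : Nat)
    (hk : k ≤ src.length) (h : src.length < k + boat.toNat) :
    condA boat src (k : Int) = false := by
  rw [condA_char boat hb src k hk]
  simp [Nat.not_le.mpr h]

theorem condA_snoc_eq (boat : Int) (hb : 0 ≤ boat) (row : List Int) (x : Int) (k : Nat)
    (hkb : k + boat.toNat ≤ row.length) :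
    condA boat (row ++ [x]) (k : Int) = condA boat row (k : Int) := by
  rw [condA_char boat hb _ k (by simp; omega), condA_char boat hb _ k (by omega)]
  have hd : (row ++ [x]).drop k = row.drop k ++ [x] :=
    List.drop_append_of_le_length (by omega)
  have ht : (row.drop k ++ [x]).take boat.toNat = (row.drop k).take boat.toNat :=
    List.take_append_of_le_length (by simp; omega)
  rw [hd, ht]
  simp only [List.length_append, List.length_singleton]
  congr 1
  simp only [decide_eq_decide]
  omega

theorem condA_emit (boat : Int) (hb : 0 ≤ boat) (src : List Int) (hbl : boat.toNat ≤ src.length) :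
    condA boat src ((src.length - boat.toNat : Nat) : Int) = decide (boat ≤ zrun src) := by
  rw [condA_char boat hb src _ (by omega)]
  have h1 : src.length - boat.toNat + boat.toNat ≤ src.length := by omega
  rw [decide_eq_true h1, Bool.true_and]
  have hlen : (src.drop (src.length - boat.toNat)).length = boat.toNat := by
    simp; omega
  rw [List.take_of_length_le (by omega)]
  have hz := zrun_ge_iff src boat.toNat
  have hbi : (boat.toNat : Int) = boat := Int.toNat_of_nonneg hb
  rw [hbi] at hz
  by_cases hc : boat ≤ zrun src
  · rw [decide_eq_true hc]
    exact (hz.mp hc).2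
  · rw [decide_eq_false hc]
    by_contra hall
    exact hc (hz.mpr ⟨by omega, by simpa using hall⟩)

theorem innerR_snoc (boat i : Int) (hb : 0 ≤ boat) (row : List Int) (x : Int) :
    innerR boat i (row ++ [x]) (row.length + 1) = innerR boat i row row.length ++
      (if boat ≤ zrun (row ++ [x]) then
        [wndw i ((row.length : Int) + 1 - boat) ((row.length : Int) + 1)] else []) := by
  have hbi : (boat.toNat : Int) = boat := Int.toNat_of_nonneg hb
  have hlen' : (row ++ [x]).length = row.length + 1 := by simp
  by_cases hbig : row.length + 1 < boat.toNat
  case pos =>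
    have hz : ¬ (boat ≤ zrun (row ++ [x])) := by
      have := zrun_le_len (row ++ [x])
      rw [hlen'] at this
      push_cast at this ⊢
      omega
    rw [if_neg hz, innerR, innerR]
    have e1 : ∀ k, k < row.length + 1 → condA boat (row ++ [x]) (k : Int) = false := by
      intro k hk
      exact condA_hi_false boat hb _ k (by omega) (by omega)
    have e2 : ∀ k, k < row.length → condA boat row (k : Int) = false := by
      intro k hk
      exact condA_hi_false boat hb _ k (by omega) (by omega)
    rw [List.filter_eq_nil_iff.mpr (by intro k hk; simp [e1 k (List.mem_range.mp hk)]),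
      List.filter_eq_nil_iff.mpr (by intro k hk; simp [e2 k (List.mem_range.mp hk)])]
    simp
  case neg =>
  have hble : boat.toNat ≤ row.length + 1 := by omega
  have hK : (row ++ [x]).length - boat.toNat = row.length + 1 - boat.toNat := by rw [hlen']
  have hemit : condA boat (row ++ [x]) ((row.length + 1 - boat.toNat : Nat) : Int) =
      decide (boat ≤ zrun (row ++ [x])) := by
    rw [← hK]
    exact condA_emit boat hb (row ++ [x]) (by omega)
  rw [innerR, innerR, List.range_succ, List.filter_append, List.map_append]
  rw [filter_range_split row.length (row.length + 1 - boat.toNat)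
    (fun k => condA boat row (k : Int)) (fun k => condA boat (row ++ [x]) (k : Int))
    (fun k hk => condA_snoc_eq boat hb row x k (by omega))
    (fun k h1 h2 => condA_hi_false boat hb _ k (by omega) (by omega))
    (fun k h1 h2 => condA_hi_false boat hb _ k (by omega) (by omega))]
  rw [List.map_append, List.append_assoc]
  congr 1
  rcases Nat.lt_or_ge boat.toNat 2 with h2 | h2
  · rcases Nat.lt_or_ge boat.toNat 1 with h1 | h1
    · -- boat = 0: every position emits the empty window, including the new last one
      have hb0 : boat = 0 := by omega
      have hK0 : row.length + 1 - boat.toNat = row.length + 1 := by omega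
      have hcn : condA boat (row ++ [x]) ((row.length : Nat) : Int) = true := by
        rw [condA_char boat hb _ _ (by omega)]
        simp [hb0]
      have hznn : 0 ≤ zrun (row ++ [x]) := zrun_nonneg _
      rw [hK0, if_neg (by rintro ⟨h1, _⟩; omega), if_pos (by omega : boat ≤ zrun (row ++ [x]))]
      simp only [List.filter, hcn, List.map_nil, List.map_cons, List.nil_append]
      rw [show wndw i (row.length : Int) ((row.length : Int) + boat) = [] from by
          rw [wndw, PySem.List.pyRange_one_eq_nil (by omega)]; rfl,
        show wndw i ((row.length : Int) + 1 - boat) ((row.length : Int) + 1) = [] from by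
          rw [wndw, PySem.List.pyRange_one_eq_nil (by omega)]; rfl]
    · -- boat = 1: the possible new spot is the last cell itself
      have hb1 : boat = 1 := by omega
      have hK1 : row.length + 1 - boat.toNat = row.length := by omega
      rw [hK1, if_neg (by rintro ⟨h1, _⟩; omega)]
      simp only [List.filter]
      rw [hK1] at hemit
      rw [hemit]
      by_cases hc : boat ≤ zrun (row ++ [x])
      · rw [decide_eq_true hc, if_pos hc]
        simp only [List.map_cons, List.map_nil]
        have e1 : (row.length : Int) + 1 - boat = (row.length : Int) := by omega
        have e2 : (row.length : Int) + 1 = (row.length : Int) + boat := by omega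
        rw [e1, e2]
        rfl
      · rw [decide_eq_false hc, if_neg hc]
        rfl
  · -- boat ≥ 2: the possible new spot starts inside the old row
    have hKlt : row.length + 1 - boat.toNat < row.length := by omega
    have hcn : condA boat (row ++ [x]) ((row.length : Nat) : Int) = false := by
      exact condA_hi_false boat hb _ _ (by omega) (by omega)
    simp only [List.filter, hcn, List.map_nil, List.append_nil]
    rw [hemit]
    by_cases hc : boat ≤ zrun (row ++ [x])
    · rw [decide_eq_true hc, if_pos ⟨hKlt, rfl⟩, if_pos hc]
      simp only [List.map_cons, List.map_nil]
      have e1 : ((row.length + 1 - boat.toNat : Nat) : Int) = (row.length : Int) + 1 - boat := by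
        omega
      have e2 : (row.length : Int) + 1 - boat + boat = (row.length : Int) + 1 := by ring
      rw [e1, e2]
    · rw [decide_eq_false hc, if_neg (by rintro ⟨_, h⟩; simp at h), if_neg hc]
      rfl

theorem innerA_snoc (boat i : Int) (hb : 0 ≤ boat) (row : List Int) (x : Int) :
    innerA boat i (row ++ [x]) = innerA boat i row ++
      (if boat ≤ zrun (row ++ [x]) then
        [wndw i ((row.length : Int) + 1 - boat) ((row.length : Int) + 1)] else []) := by
  rw [innerA_eq_innerR, innerA_eq_innerR]
  have h : (row ++ [x]).length = row.length + 1 := by simp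
  rw [h, innerR_snoc boat i hb]

theorem innerA_eq_innerB (boat i : Int) (hb : 0 ≤ boat) (row : List Int) :
    innerA boat i row = innerB boat i row := by
  induction row using List.reverseRecOn with
  | nil => simp [innerA, innerB, PySem.List.enumerate_nil]
  | append_singleton row x ih => rw [innerA_snoc boat i hb, innerB_snoc, ih]

-- ===== VERDICT (by name: the statement is the Claim_ definition above) =====
set_option maxHeartbeats 1000000 in
theorem find_horizontal_valid_spots_spec : Claim_equal_find_horizontal_valid_spots := by
  intro boat board _ hb
  show find_horizontal_valid_spots boat board = find_horizontal_valid_spots_alt boat board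
  have hA : find_horizontal_valid_spots boat board =
      (PySem.List.enumerate board).foldl
        (fun acc (ir : Int × List Int) => acc ++ innerA boat ir.1 ir.2) [] := by
    rw [find_horizontal_valid_spots]
    exact PySem.List.foldl_congr_mem _ _ _ _ (fun acc ir hm => fold_innerA boat ir.1 ir.2 acc)
  have hB : find_horizontal_valid_spots_alt boat board =
      (PySem.List.enumerate board).foldl
        (fun acc (ir : Int × List Int) => acc ++ innerB boat ir.1 ir.2) [] := by
    rw [find_horizontal_valid_spots_alt]
    exact PySem.List.foldl_congr_mem _ _ _ _
      (fun (acc : List (List (Int × Int))) (ir : Int × List Int) hm => by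
        show ((PySem.List.enumerate ir.2).foldl (bstep boat ir.1) (0, acc)).2 = _
        rw [fold_innerB_snd]
        rfl)
  rw [hA, hB, PySem.List.foldl_append_eq_flatMap, PySem.List.foldl_append_eq_flatMap]
  have h : (fun (ir : Int × List Int) => innerA boat ir.1 ir.2) =
      (fun (ir : Int × List Int) => innerB boat ir.1 ir.2) :=
    funext (fun ir => innerA_eq_innerB boat ir.1 (hb : 0 ≤ boat) ir.2)
  rw [h]
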